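-- pv_equiv track=rewrite | github.com/EOued/Projet_Stade | utils/utils.py | fields_data_loading
-- ===== SOURCE A (Python) =====
-- def int_to_time_periods(x: int, ftype: int = 0) -> list[list[int]]:
--     periods = []
--     start = None
--
--     for i in range(24):
--         if (x >> i) & 1:
--             if start is None:
--                 start = i
--         else:
--             if start is not None:
--                 periods.append([start, i, (ftype >> i - 1) & 1])
--                 start = None
--
--     if start is not None:
--         periods.append([start, 0, (ftype >> 23) & 1])
--
--     return periods
--
-- def fields_data_loading(data):
--     ret_data = {}
--     days = ["Lundi", "Mardi", "Mercredi", "Jeudi", "Vendredi", "Samedi", "Dimanche"]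
--     for day, elements in enumerate(data):
--         for element in int_to_time_periods(elements):
--             if element == []:
--                 continue
--             if days[day] not in ret_data:
--                 ret_data[days[day]] = []
--             ret_data[days[day]].append(
--                 [
--                     f"{element[0]}h",
--                     f"{element[1]}h",
--                 ]
--             )
--     return ret_data
-- ===== SOURCE B (Python) =====
-- def fields_data_loading(data):
--     days = ["Lundi", "Mardi", "Mercredi", "Jeudi", "Vendredi", "Samedi", "Dimanche"]
--     ret = {}
--     for day, x in enumerate(data):
--         bits = [(x >> i) & 1 for i in range(24)]
--         pairs = list(zip([0] + bits, bits + [0]))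
--         starts = [i for i, (p, b) in enumerate(pairs) if b and not p]
--         ends = [i % 24 for i, (p, b) in enumerate(pairs) if p and not b]
--         periods = [[f"{s}h", f"{e}h"] for s, e in zip(starts, ends)]
--         if periods:
--             ret[days[day]] = periods
--     return ret
-- ===== Notes on version B (the rewrite author's own statement) =====
-- stated objective: simpler
-- what changed: Replaces A's stateful per-bit run-tracking loop (start sentinel, conditional appends, post-loop wrap case) by a declarative edge detection: zip the 24-bit vector with its shifted self, read run starts and run ends as two comprehensions (with i % 24 folding the end-of-day wrap), and pair them with zip.
import Mathlib
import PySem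

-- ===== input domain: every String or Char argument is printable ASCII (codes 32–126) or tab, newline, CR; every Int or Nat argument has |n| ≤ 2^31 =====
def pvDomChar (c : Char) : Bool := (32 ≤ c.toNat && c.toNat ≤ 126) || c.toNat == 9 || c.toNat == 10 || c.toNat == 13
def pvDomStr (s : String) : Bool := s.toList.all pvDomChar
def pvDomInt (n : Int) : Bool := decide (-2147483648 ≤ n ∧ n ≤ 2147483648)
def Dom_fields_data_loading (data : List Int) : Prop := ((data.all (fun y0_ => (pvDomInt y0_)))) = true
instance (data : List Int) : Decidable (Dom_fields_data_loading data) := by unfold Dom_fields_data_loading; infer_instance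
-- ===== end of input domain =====

-- B replaces A's stateful per-bit run accumulator by a declarative edge detection: it zips the
-- bit vector with its shift, reads run starts/ends as comprehensions, and pairs them by zip
-- (objective: simpler). Equivalence is proved on all inputs where the Python A returns (Pre_).

-- ===== PORT A =====
-- (x >> i) & 1; every shift amount used is a loop index ≥ 0, so .toNat is exact
def pvBit (x i : Int) : Int := PySem.Int.band (x >>> i.toNat) 1

-- loop body of int_to_time_periods; (ftype >> i - 1): the branch is only reached with i ≥ 1
-- (start is set at an earlier index), where (i-1).toNat is exact
def ittpStep (x ftype : Int) (st : List (List Int) × Option Int) (i : Int) :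
    List (List Int) × Option Int :=
  if pvBit x i ≠ 0 then
    match st.2 with
    | none => (st.1, some i)
    | some _ => st
  else
    match st.2 with
    | some s => (st.1 ++ [[s, i, PySem.Int.band (ftype >>> (i - 1).toNat) 1]], none)
    | none => st

def int_to_time_periods (x : Int) (ftype : Int) : List (List Int) :=
  let r := (PySem.List.pyRange 0 24 1).foldl (ittpStep x ftype) ([], none)
  match r.2 with
  | some s => r.1 ++ [[s, 0, PySem.Int.band (ftype >>> (23 : Nat)) 1]]
  | none => r.1

def pvDays : List String := ["Lundi", "Mardi", "Mercredi", "Jeudi", "Vendredi", "Samedi", "Dimanche"]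

-- body of A's inner loop; days[day] is in range under Pre_, element[0]/element[1] always exist
def fdlInner (day : Int) (ret : PySem.Dict String (List (List String))) (element : List Int) :
    PySem.Dict String (List (List String)) :=
  if element = ([] : List Int) then ret
  else
    let name := PySem.List.pyGetD pvDays day ""
    let ret := if ret.contains name = false then ret.insert name [] else ret
    ret.modify name [] (fun l =>
      l ++ [[PySem.Int.toStr (PySem.List.pyGetD element 0 0) ++ "h",
             PySem.Int.toStr (PySem.List.pyGetD element 1 0) ++ "h"]])

def fdlDay (ret : PySem.Dict String (List (List String))) (de : Int × Int) :
    PySem.Dict String (List (List String)) :=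
  (int_to_time_periods de.2 0).foldl (fdlInner de.1) ret

def fields_data_loading (data : List Int) : List (String × List (List String)) :=
  ((PySem.List.enumerate data).foldl fdlDay PySem.Dict.empty).items

-- ===== PORT B =====
def altDay (ret : List (String × List (List String))) (dx : Int × Int) :
    List (String × List (List String)) :=
  let bits := (PySem.List.pyRange 0 24 1).map (fun i => pvBit dx.2 i)
  let pairs := ((0 :: bits).zip (bits ++ [0]))
  let starts := (PySem.List.enumerate pairs).filterMap
    (fun q => if q.2.2 ≠ 0 ∧ q.2.1 = 0 then some q.1 else none)
  let ends := (PySem.List.enumerate pairs).filterMap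
    (fun q => if q.2.1 ≠ 0 ∧ q.2.2 = 0 then some (PySem.Int.mod q.1 24) else none)
  let periods := (starts.zip ends).map
    (fun se => [PySem.Int.toStr se.1 ++ "h", PySem.Int.toStr se.2 ++ "h"])
  if periods = [] then ret else ret ++ [(PySem.List.pyGetD pvDays dx.1 "", periods)]

def fields_data_loading_alt (data : List Int) : List (String × List (List String)) :=
  (PySem.List.enumerate data).foldl altDay []

-- ===== PRECONDITION & SPEC =====
-- A raises IndexError (days[day]) iff some element at index ≥ 7 has a set bit among its low 24
-- bits; Pre_ excludes exactly those inputs (elements beyond index 7 must be ≡ 0 mod 2^24).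
def Pre_fields_data_loading (data : List Int) : Prop :=
  ∀ x ∈ data.drop 7, PySem.Int.mod x 16777216 = 0
instance (data : List Int) : Decidable (Pre_fields_data_loading data) := by
  unfold Pre_fields_data_loading; infer_instance
def pvWitness_fields_data_loading : List Int := [3, 0, 8388608]

def Spec_fields_data_loading (data : List Int) (out : List (String × List (List String))) : Prop := out = fields_data_loading_alt data
instance (data : List Int) (out : List (String × List (List String))) : Decidable (Spec_fields_data_loading data out) := by unfold Spec_fields_data_loading; infer_instance

-- ===== CLAIM (what is proved, stated in full; the proofs are below) =====
def Claim_equal_fields_data_loading : Prop := ∀ (data : List Int), Dom_fields_data_loading data → Pre_fields_data_loading data → Spec_fields_data_loading data (fields_data_loading data)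

-- ===== LEMMAS AND PROOFS =====

-- recursive characterisation of A's run-collecting loop (ftype = 0)
def runsL : List Int → Int → Option Int → List (List Int)
  | [], _, none => []
  | [], _, some s => [[s, 0, 0]]
  | b :: bs, i, st =>
    if b ≠ 0 then runsL bs (i + 1) (some (st.getD i))
    else
      match st with
      | some s => [s, i, 0] :: runsL bs (i + 1) none
      | none => runsL bs (i + 1) none

-- recursive characterisations of B's start/end comprehensions
def sL : List Int → Int → Int → List Int
  | [], _, _ => []
  | b :: bs, i, p => (if b ≠ 0 ∧ p = 0 then [i] else []) ++ sL bs (i + 1) b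

def eL : List Int → Int → Int → List Int
  | [], i, p => if p ≠ 0 then [PySem.Int.mod i 24] else []
  | b :: bs, i, p => (if p ≠ 0 ∧ b = 0 then [PySem.Int.mod i 24] else []) ++ eL bs (i + 1) b

def triOf (se : Int × Int) : List Int := [se.1, se.2, 0]

def strOf (se : Int × Int) : List String :=
  [PySem.Int.toStr se.1 ++ "h", PySem.Int.toStr se.2 ++ "h"]

lemma band01 : PySem.Int.band (0:Int) 1 = 0 := by decide

lemma foldA (x : Int) : ∀ (n : Nat) (i : Int) (acc : List (List Int)) (st : Option Int),
    i + n = 24 →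
    (let r := (PySem.List.pyRange i 24 1).foldl (ittpStep x 0) (acc, st)
     match r.2 with
     | some s => r.1 ++ [[s, 0, PySem.Int.band ((0:Int) >>> (23 : Nat)) 1]]
     | none => r.1)
    = acc ++ runsL ((PySem.List.pyRange i 24 1).map (pvBit x)) i st := by
  intro n
  induction n with
  | zero =>
      intro i acc st h
      have hi : i = 24 := by omega
      subst hi
      have hr : PySem.List.pyRange 24 24 1 = [] := by decide
      rw [hr]
      cases st with
      | none => simp [runsL]
      | some s => simp [runsL, band01]
  | succ n ih =>
      intro i acc st h
      have hlt : i < 24 := by omega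
      rw [PySem.List.pyRange_one_cons hlt]
      simp only [List.foldl_cons, List.map_cons]
      by_cases hb : pvBit x i ≠ 0
      · cases st with
        | none =>
            rw [show ittpStep x 0 (acc, none) i = (acc, some i) by simp [ittpStep, hb]]
            rw [ih (i+1) acc (some i) (by omega)]
            simp [runsL, hb]
        | some s =>
            rw [show ittpStep x 0 (acc, some s) i = (acc, some s) by simp [ittpStep, hb]]
            rw [ih (i+1) acc (some s) (by omega)]
            simp [runsL, hb]
      · have hb0 : pvBit x i = 0 := by omega
        cases st with
        | none =>
            rw [show ittpStep x 0 (acc, none) i = (acc, none) by simp [ittpStep, hb0]]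
            rw [ih (i+1) acc none (by omega)]
            simp [runsL, hb0]
        | some s =>
            rw [show ittpStep x 0 (acc, some s) i
              = (acc ++ [[s, i, 0]], none) by simp [ittpStep, hb0, band01]]
            rw [ih (i+1) (acc ++ [[s, i, 0]]) none (by omega)]
            simp [runsL, hb0]

lemma filterS : ∀ (bs : List Int) (i p : Int),
    (PySem.List.enumerate ((p :: bs).zip (bs ++ [0])) i).filterMap
      (fun q => if q.2.2 ≠ 0 ∧ q.2.1 = 0 then some q.1 else none) = sL bs i p := by
  intro bs
  induction bs with
  | nil => intro i p; simp [PySem.List.enumerate_cons, PySem.List.enumerate_nil, sL]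
  | cons b bs ih =>
      intro i p
      simp only [List.cons_append, List.zip_cons_cons, PySem.List.enumerate_cons,
        List.filterMap_cons, sL]
      rw [← ih (i + 1) b]
      by_cases hb : b ≠ 0 ∧ p = 0 <;> simp [hb]

lemma filterE : ∀ (bs : List Int) (i p : Int),
    (PySem.List.enumerate ((p :: bs).zip (bs ++ [0])) i).filterMap
      (fun q => if q.2.1 ≠ 0 ∧ q.2.2 = 0 then some (PySem.Int.mod q.1 24) else none) = eL bs i p := by
  intro bs
  induction bs with
  | nil =>
      intro i p
      simp only [List.nil_append, List.zip_cons_cons, List.zip_nil_left,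
        PySem.List.enumerate_cons, PySem.List.enumerate_nil, List.filterMap_cons, eL]
      by_cases hp : p ≠ 0 <;> simp [hp]
  | cons b bs ih =>
      intro i p
      simp only [List.cons_append, List.zip_cons_cons, PySem.List.enumerate_cons,
        List.filterMap_cons, eL]
      rw [← ih (i + 1) b]
      by_cases hb : p ≠ 0 ∧ b = 0 <;> simp [hb]

lemma mod24_small {i : Int} (h0 : 0 ≤ i) (h : i < 24) : PySem.Int.mod i 24 = i := by
  rw [PySem.Int.mod_eq_emod_of_pos (by norm_num)]
  exact Int.emod_eq_of_lt h0 h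

lemma mainRuns : ∀ (bs : List Int) (i : Int), 0 ≤ i → i + bs.length = 24 →
    (runsL bs i none = ((sL bs i 0).zip (eL bs i 0)).map triOf)
    ∧ (∀ s p, p ≠ 0 → runsL bs i (some s) = (((s :: sL bs i p).zip (eL bs i p)).map triOf)) := by
  intro bs
  induction bs with
  | nil =>
      intro i h0 h
      have hi : i = 24 := by simpa using h
      subst hi
      refine ⟨by simp [runsL, sL, eL], ?_⟩
      intro s p hp
      simp [runsL, sL, eL, hp, triOf]
  | cons b bs ih =>
      intro i h0 h
      have hrec := ih (i + 1) (by omega) (by simp at h ⊢; omega)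
      have hlt : i < 24 := by simp at h; omega
      constructor
      · by_cases hb : b ≠ 0
        · show (if b ≠ 0 then runsL bs (i + 1) (some ((none : Option Int).getD i))
              else match (none : Option Int) with
                | some s => [s, i, 0] :: runsL bs (i + 1) none
                | none => runsL bs (i + 1) none) = _
          rw [if_pos hb]
          show runsL bs (i + 1) (some i) = _
          rw [hrec.2 i b hb]
          show _ = List.map triOf ((((if b ≠ 0 ∧ (0:Int) = 0 then [i] else []) ++ sL bs (i + 1) b).zip
            ((if (0:Int) ≠ 0 ∧ b = 0 then [PySem.Int.mod i 24] else []) ++ eL bs (i + 1) b)))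
          rw [if_pos ⟨hb, rfl⟩, if_neg (by simp)]
          simp
        · have hb0 : b = 0 := by omega
          subst hb0
          show runsL (0 :: bs) i none = _
          have h1 : runsL (0 :: bs) i none = runsL bs (i + 1) none := by
            simp [runsL]
          rw [h1, hrec.1]
          show _ = List.map triOf ((((if (0:Int) ≠ 0 ∧ (0:Int) = 0 then [i] else []) ++ sL bs (i + 1) 0).zip
            ((if (0:Int) ≠ 0 ∧ (0:Int) = 0 then [PySem.Int.mod i 24] else []) ++ eL bs (i + 1) 0)))
          simp
      · intro s p hp
        by_cases hb : b ≠ 0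
        · show (if b ≠ 0 then runsL bs (i + 1) (some ((some s : Option Int).getD i))
              else match (some s : Option Int) with
                | some s => [s, i, 0] :: runsL bs (i + 1) none
                | none => runsL bs (i + 1) none) = _
          rw [if_pos hb]
          show runsL bs (i + 1) (some s) = _
          rw [hrec.2 s b hb]
          show _ = List.map triOf (((s :: ((if b ≠ 0 ∧ p = 0 then [i] else []) ++ sL bs (i + 1) b)).zip
            ((if p ≠ 0 ∧ b = 0 then [PySem.Int.mod i 24] else []) ++ eL bs (i + 1) b)))
          rw [if_neg (fun hc => hp hc.2), if_neg (fun hc => hb hc.2)]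
          simp
        · have hb0 : b = 0 := by omega
          subst hb0
          have h1 : runsL (0 :: bs) i (some s) = [s, i, 0] :: runsL bs (i + 1) none := by
            simp [runsL]
          rw [h1, hrec.1]
          show _ = List.map triOf (((s :: ((if (0:Int) ≠ 0 ∧ p = 0 then [i] else []) ++ sL bs (i + 1) 0)).zip
            ((if p ≠ 0 ∧ (0:Int) = 0 then [PySem.Int.mod i 24] else []) ++ eL bs (i + 1) 0)))
          rw [if_neg (by simp), if_pos ⟨hp, rfl⟩, mod24_small h0 hlt]
          simp [triOf]

-- ============ glue lemmas ============

lemma bits_eq_zero {x : Int} (hm : PySem.Int.mod x 16777216 = 0) :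
    (PySem.List.pyRange 0 24 1).map (pvBit x) = List.replicate 24 0 := by
  have hdvd : (16777216 : Int) ∣ x := by
    rwa [← PySem.Int.mod_eq_zero_iff_dvd]
  have hb : ∀ i ∈ PySem.List.pyRange 0 24 1, pvBit x i = 0 := by
    intro i hi
    have hmem := (PySem.List.mem_pyRange_one).1 hi
    obtain ⟨m, hm⟩ := hdvd
    have hk : i.toNat < 24 := by omega
    unfold pvBit
    rw [PySem.Int.band_one, Int.shiftRight_eq_div_pow]
    have hx : x = (2 : Int) ^ i.toNat * (2 ^ (23 - i.toNat) * (2 * m)) := by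
      rw [hm]
      have h24 : i.toNat + (23 - i.toNat + 1) = 24 := by omega
      have : (16777216 : Int) = 2 ^ i.toNat * (2 ^ (23 - i.toNat) * 2) := by
        rw [← pow_succ, ← pow_add, h24]; norm_num
      rw [this]; ring
    push_cast
    rw [hx, Int.mul_ediv_cancel_left _ (by positivity)]
    rw [PySem.Int.mod_eq_emod_of_pos (by norm_num)]
    have : (2 : Int) ^ (23 - i.toNat) * (2 * m) = 2 * (2 ^ (23 - i.toNat) * m) := by ring
    rw [this, Int.mul_emod_right]
  calc (PySem.List.pyRange 0 24 1).map (pvBit x)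
      = (PySem.List.pyRange 0 24 1).map (fun _ => (0 : Int)) := List.map_congr_left hb
    _ = List.replicate 24 0 := by decide

lemma zl_nil : ((sL (List.replicate 24 0) 0 0).zip (eL (List.replicate 24 0) 0 0)) = ([] : List (Int × Int)) := by
  decide

-- A's per-element string builder applied to a triple
lemma strOf_tri (se : Int × Int) :
    [PySem.Int.toStr (PySem.List.pyGetD (triOf se) 0 0) ++ "h",
     PySem.Int.toStr (PySem.List.pyGetD (triOf se) 1 0) ++ "h"] = strOf se := by
  simp [triOf, strOf, PySem.List.pyGetD]

lemma modify_insert {κ ν : Type} [BEq κ] [LawfulBEq κ] (d : PySem.Dict κ ν) (k : κ)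
    (acc : ν) (dflt : ν) (f : ν → ν) :
    (d.insert k acc).modify k dflt f = d.insert k (f acc) := by
  show (d.insert k acc).insert k (f ((d.insert k acc).getD k dflt)) = _
  rw [PySem.Dict.getD_insert_self, PySem.Dict.insert_insert_self]

lemma inner_step (day : Int) (d : PySem.Dict String (List (List String)))
    (acc : List (List String)) (se : Int × Int) :
    fdlInner day (d.insert (PySem.List.pyGetD pvDays day "") acc) (triOf se)
      = d.insert (PySem.List.pyGetD pvDays day "") (acc ++ [strOf se]) := by
  unfold fdlInner
  rw [if_neg (by simp [triOf])]
  simp only [PySem.Dict.contains_insert_self, Bool.true_eq_false, if_false]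
  rw [modify_insert]
  rw [strOf_tri]

lemma innerAux (day : Int) :
    ∀ (l : List (Int × Int)) (d : PySem.Dict String (List (List String))) (acc : List (List String)),
    (l.map triOf).foldl (fdlInner day) (d.insert (PySem.List.pyGetD pvDays day "") acc)
      = d.insert (PySem.List.pyGetD pvDays day "") (acc ++ l.map strOf) := by
  intro l
  induction l with
  | nil => intro d acc; simp
  | cons se l ih =>
      intro d acc
      simp only [List.map_cons, List.foldl_cons]
      rw [inner_step, ih d (acc ++ [strOf se])]
      simp

lemma innerMain (day : Int) (l : List (Int × Int)) (d : PySem.Dict String (List (List String)))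
    (hfresh : d.contains (PySem.List.pyGetD pvDays day "") = false) :
    (l.map triOf).foldl (fdlInner day) d
      = if l = [] then d else d.insert (PySem.List.pyGetD pvDays day "") (l.map strOf) := by
  cases l with
  | nil => simp
  | cons se l =>
      rw [if_neg (by simp)]
      simp only [List.map_cons, List.foldl_cons]
      have hstep : fdlInner day d (triOf se)
          = d.insert (PySem.List.pyGetD pvDays day "") [strOf se] := by
        unfold fdlInner
        rw [if_neg (by simp [triOf])]
        simp only [hfresh, if_true]
        rw [modify_insert]
        rw [strOf_tri]
        simp
      rw [hstep, innerAux day l d [strOf se]]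
      simp

-- one day's periods, both sides
lemma day_elems (x : Int) :
    int_to_time_periods x 0
      = (((sL ((PySem.List.pyRange 0 24 1).map (pvBit x)) 0 0).zip
          (eL ((PySem.List.pyRange 0 24 1).map (pvBit x)) 0 0)).map triOf) := by
  have hlen : (0 : Int) + (((PySem.List.pyRange 0 24 1).map (pvBit x)).length : Int) = 24 := by
    rw [List.length_map, show (PySem.List.pyRange 0 24 1).length = 24 from by decide]
    norm_num
  have h := foldA x 24 0 [] none (by norm_num)
  have hm := (mainRuns ((PySem.List.pyRange 0 24 1).map (pvBit x)) 0 le_rfl hlen).1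
  unfold int_to_time_periods
  rw [hm] at h
  simpa using h

lemma altDay_eq (ret : List (String × List (List String))) (dx : Int × Int) :
    altDay ret dx =
      (if ((sL ((PySem.List.pyRange 0 24 1).map (pvBit dx.2)) 0 0).zip
          (eL ((PySem.List.pyRange 0 24 1).map (pvBit dx.2)) 0 0)) = [] then ret
       else ret ++ [(PySem.List.pyGetD pvDays dx.1 "",
          ((sL ((PySem.List.pyRange 0 24 1).map (pvBit dx.2)) 0 0).zip
           (eL ((PySem.List.pyRange 0 24 1).map (pvBit dx.2)) 0 0)).map strOf)]) := by
  simp only [altDay]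
  rw [filterS, filterE]
  by_cases hz : ((sL ((PySem.List.pyRange 0 24 1).map (pvBit dx.2)) 0 0).zip
      (eL ((PySem.List.pyRange 0 24 1).map (pvBit dx.2)) 0 0)) = ([] : List (Int × Int))
  · simp [hz]
  · simp only [hz, if_false, List.map_eq_nil_iff]
    rfl

lemma altDay_split (acc : List (String × List (List String))) (p : Int × Int) :
    altDay acc p = acc ++ altDay [] p := by
  rw [altDay_eq, altDay_eq]
  by_cases hz : ((sL ((PySem.List.pyRange 0 24 1).map (pvBit p.2)) 0 0).zip
      (eL ((PySem.List.pyRange 0 24 1).map (pvBit p.2)) 0 0)) = ([] : List (Int × Int))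
  · simp [hz]
  · simp [hz]

lemma altDay_acc : ∀ (l : List (Int × Int)) (acc : List (String × List (List String))),
    l.foldl altDay acc = acc ++ l.foldl altDay [] := by
  intro l
  induction l with
  | nil => intro acc; simp
  | cons p l ih =>
      intro acc
      simp only [List.foldl_cons]
      rw [ih (altDay acc p), ih (altDay [] p), altDay_split acc p]
      simp

lemma days_distinct : ∀ (s j : Nat), s < j → j < 7 → pvDays.getD s "" ≠ pvDays.getD j "" := by
  intro s j h1 h2
  interval_cases j <;> interval_cases s <;> decide

lemma outer : ∀ (rest : List Int) (s : Nat) (d : PySem.Dict String (List (List String))),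
    (∀ j : Nat, s ≤ j → j < 7 → d.contains (pvDays.getD j "") = false) →
    (∀ x ∈ rest.drop (7 - s), PySem.Int.mod x 16777216 = 0) →
    ((PySem.List.enumerate rest (s : Int)).foldl fdlDay d).items
      = d.items ++ (PySem.List.enumerate rest (s : Int)).foldl altDay [] := by
  intro rest
  induction rest with
  | nil => intro s d _ _; simp [PySem.List.enumerate_nil]
  | cons x rest ih =>
      intro s d hfresh hmask
      rw [PySem.List.enumerate_cons]
      simp only [List.foldl_cons]
      have hcast : (s : Int) + 1 = ((s + 1 : Nat) : Int) := by push_cast; ring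
      have hA : fdlDay d ((s : Int), x)
          = (((sL ((PySem.List.pyRange 0 24 1).map (pvBit x)) 0 0).zip
              (eL ((PySem.List.pyRange 0 24 1).map (pvBit x)) 0 0)).map triOf).foldl
              (fdlInner (s : Int)) d := by
        unfold fdlDay
        rw [day_elems]
      by_cases hs7 : s < 7
      · have hfr : d.contains (PySem.List.pyGetD pvDays ((s : Nat) : Int) "") = false := by
          rw [PySem.List.pyGetD_natCast]
          exact hfresh s le_rfl hs7
        rw [hA, innerMain (s : Int) _ d hfr]
        rw [altDay_eq]
        by_cases hz : ((sL ((PySem.List.pyRange 0 24 1).map (pvBit x)) 0 0).zip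
            (eL ((PySem.List.pyRange 0 24 1).map (pvBit x)) 0 0)) = ([] : List (Int × Int))
        · rw [if_pos hz]
          simp only [hz, if_true]
          rw [hcast, ih (s + 1) d
            (fun j hj hj7 => hfresh j (by omega) hj7)
            (by
              intro y hy
              apply hmask
              have h7 : 7 - s = (7 - (s + 1)) + 1 := by omega
              rw [h7]
              simpa using hy)]
        · rw [if_neg hz, if_neg hz]
          have hname : PySem.List.pyGetD pvDays ((s : Nat) : Int) "" = pvDays.getD s "" :=
            PySem.List.pyGetD_natCast pvDays s ""
          have hfr' : ∀ j : Nat, s + 1 ≤ j → j < 7 →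
              ((d.insert (PySem.List.pyGetD pvDays ((s : Nat) : Int) "")
                (((sL ((PySem.List.pyRange 0 24 1).map (pvBit x)) 0 0).zip
                  (eL ((PySem.List.pyRange 0 24 1).map (pvBit x)) 0 0)).map strOf)).contains
                (pvDays.getD j "")) = false := by
            intro j hj hj7
            rw [PySem.Dict.contains_insert, hname]
            have hne : (pvDays.getD j "" == pvDays.getD s "") = false := by
              simp only [beq_eq_false_iff_ne, ne_eq]
              exact fun he => days_distinct s j (by omega) hj7 he.symm
            rw [hne, hfresh j (by omega) hj7]
            rfl
          rw [hcast, ih (s + 1) _ hfr'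
            (by
              intro y hy
              apply hmask
              have h7 : 7 - s = (7 - (s + 1)) + 1 := by omega
              rw [h7]
              simpa using hy)]
          rw [PySem.Dict.items_insert_of_not_contains _ _ hfr]
          have hacc := altDay_acc (PySem.List.enumerate rest ((s + 1 : Nat) : Int))
            [(PySem.List.pyGetD pvDays ((s : Nat) : Int) "",
              ((sL ((PySem.List.pyRange 0 24 1).map (pvBit x)) 0 0).zip
               (eL ((PySem.List.pyRange 0 24 1).map (pvBit x)) 0 0)).map strOf)]
          dsimp only
          rw [List.nil_append, hacc]
          simp
      · -- day index ≥ 7: the element is ≡ 0 mod 2^24, both sides skip it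
        have hx0 : PySem.Int.mod x 16777216 = 0 := by
          apply hmask
          rw [show 7 - s = 0 from by omega]
          simp
        have hz : ((sL ((PySem.List.pyRange 0 24 1).map (pvBit x)) 0 0).zip
            (eL ((PySem.List.pyRange 0 24 1).map (pvBit x)) 0 0)) = ([] : List (Int × Int)) := by
          rw [bits_eq_zero hx0]
          exact zl_nil
        rw [hA, hz]
        simp only [List.map_nil, List.foldl_nil]
        rw [altDay_eq]
        simp only [hz, if_true]
        rw [hcast, ih (s + 1) d
          (fun j hj hj7 => hfresh j (by omega) hj7)
          (by
            intro y hy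
            apply hmask
            rw [show 7 - s = 0 from by omega]
            rw [show 7 - (s + 1) = 0 from by omega] at hy
            simp only [List.drop_zero] at hy ⊢
            exact List.mem_cons_of_mem x hy)]

-- ===== VERDICT (by name: the statement is the Claim_ definition above) =====
theorem fields_data_loading_spec : Claim_equal_fields_data_loading := by
  intro data _ hpre
  unfold Spec_fields_data_loading fields_data_loading fields_data_loading_alt
  have h := outer data 0 PySem.Dict.empty
    (fun j _ _ => by simp [PySem.Dict.contains_empty])
    (by simpa [Pre_fields_data_loading] using hpre)
  simpa using h
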